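-- pv_equiv track=rewrite | github.com/jlescher/adventofcode | 2016/day_11_radiosisotope_thermoelectric_generators/s.py | floor_is_safe
-- ===== SOURCE A (Python) =====
-- def floor_has_generator(floor):
--     for e in floor:
--         if e[1] == 'G':
--             return True
--     return False
--
-- def floor_is_safe(floor):
--     if not floor_has_generator(floor):
--         return True
--     else:
--         for e in floor:
--             if e[1] == 'M':
--                 if e[0] + 'G' not in floor:
--                     return False
--         return True
-- ===== SOURCE B (Python) =====
-- def floor_is_safe(floor):
--     # Sort-then-merge: sort the required generator strings and the floor items,
--     # then one two-pointer sweep checks every required "<elem>G" is present.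
--     if not any(e[1] == 'G' for e in floor):
--         return True
--     needed = sorted(e[0] + 'G' for e in floor if e[1] == 'M')
--     avail = sorted(floor)
--     i = 0
--     for s in needed:
--         while i < len(avail) and avail[i] < s:
--             i += 1
--         if i == len(avail) or avail[i] != s:
--             return False
--     return True
-- ===== Notes on version B (the rewrite author's own statement) =====
-- stated objective: alternative
-- what changed: B replaces A's per-chip linear membership rescan of the floor with a sort-then-merge subset check: it sorts the required '<elem>G' strings and the floor once and verifies containment in a single two-pointer sweep.
import Mathlib
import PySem

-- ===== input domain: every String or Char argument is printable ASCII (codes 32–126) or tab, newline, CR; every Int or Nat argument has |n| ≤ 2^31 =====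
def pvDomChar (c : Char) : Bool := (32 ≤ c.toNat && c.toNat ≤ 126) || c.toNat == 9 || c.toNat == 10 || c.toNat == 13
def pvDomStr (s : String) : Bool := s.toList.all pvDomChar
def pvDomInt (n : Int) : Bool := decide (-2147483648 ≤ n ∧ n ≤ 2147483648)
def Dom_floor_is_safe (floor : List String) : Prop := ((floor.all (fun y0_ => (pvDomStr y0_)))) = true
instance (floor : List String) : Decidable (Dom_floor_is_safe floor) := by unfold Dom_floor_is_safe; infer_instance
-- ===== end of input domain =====

-- B replaces A's per-chip linear membership rescan of the floor by a
-- sort-then-merge subset check: sort the required '<elem>G' strings and the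
-- floor once, then one two-pointer sweep (objective: alternative).

-- ===== PORT A =====
-- 'e[0] + "G"': whenever either program evaluates this, the guard e[1] == 'M'
-- already held, so e is nonempty and toList.take 1 is exactly [e[0]].
def pvAddG (e : String) : String := String.ofList (e.toList.take 1 ++ ['G'])

def floor_has_generator : List String → Bool
  | [] => false
  | e :: rest =>
    if PySem.Str.pyGet? e 1 = some 'G' then true else floor_has_generator rest

def floorSafeLoop (floor : List String) : List String → Bool
  | [] => true
  | e :: rest =>
    if PySem.Str.pyGet? e 1 = some 'M' then
      if !(floor.contains (pvAddG e)) then false else floorSafeLoop floor rest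
    else floorSafeLoop floor rest

def floor_is_safe (floor : List String) : Bool :=
  if !(floor_has_generator floor) then true
  else floorSafeLoop floor floor

-- ===== PORT B =====
-- 'while i < len(avail) and avail[i] < s: i += 1'
def advanceIdx (avail : List String) (s : String) (i : Nat) : Nat :=
  if h : i < avail.length then
    if avail[i] < s then advanceIdx avail s (i + 1) else i
  else i
termination_by avail.length - i

-- 'for s in needed: <advance>; if i == len(avail) or avail[i] != s: return False'
def mergeLoop (avail : List String) : List String → Nat → Bool
  | [], _ => true
  | s :: rest, i =>
    let j := advanceIdx avail s i
    if j = avail.length ∨ avail[j]? ≠ some s then false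
    else mergeLoop avail rest j

def floor_is_safe_alt (floor : List String) : Bool :=
  if !(floor.any (fun e => PySem.Str.pyGet? e 1 == some 'G')) then true
  else
    let needed := PySem.List.sorted
      ((floor.filter (fun e => PySem.Str.pyGet? e 1 == some 'M')).map pvAddG)
      (fun x => x) false
    let avail := PySem.List.sorted floor (fun x => x) false
    mergeLoop avail needed 0

-- ===== PRECONDITION & SPEC =====
-- Pre_ excludes floors containing an item string shorter than 2 characters: on
-- these the Python A raises IndexError at e[1] whenever such an item is reached
-- (A returns only when an early return fires before reaching it, an accident of
-- scan order), and B's comprehension raises IndexError on them as well.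
def Pre_floor_is_safe (floor : List String) : Prop :=
  ∀ e ∈ floor, 2 ≤ e.toList.length
instance (floor : List String) : Decidable (Pre_floor_is_safe floor) := by
  unfold Pre_floor_is_safe; infer_instance

def pvWitness_floor_is_safe : List String := ["HG", "HM", "LM", "LG"]

def Spec_floor_is_safe (floor : List String) (out : Bool) : Prop := out = floor_is_safe_alt floor
instance (floor : List String) (out : Bool) : Decidable (Spec_floor_is_safe floor out) := by unfold Spec_floor_is_safe; infer_instance

-- ===== CLAIM (what is proved, stated in full; the proofs are below) =====
def Claim_equal_floor_is_safe : Prop := ∀ (floor : List String), Dom_floor_is_safe floor → Pre_floor_is_safe floor → Spec_floor_is_safe floor (floor_is_safe floor)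

-- ===== LEMMAS AND PROOFS =====

-- floor_has_generator is an 'any'.
theorem has_gen_any (l : List String) :
    floor_has_generator l = l.any (fun e => PySem.Str.pyGet? e 1 == some 'G') := by
  induction l with
  | nil => rfl
  | cons e rest ih =>
    simp only [floor_has_generator, List.any_cons, ih]
    split_ifs with hge
    · have hb : (PySem.Str.pyGet? e 1 == some 'G') = true := by
        simp only [beq_iff_eq]; exact hge
      rw [hb, Bool.true_or]
    · have hb : (PySem.Str.pyGet? e 1 == some 'G') = false := by
        simp only [beq_eq_false_iff_ne, ne_eq]; exact hge
      rw [hb, Bool.false_or]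

-- floorSafeLoop is an 'all'.
theorem safe_loop_all (floor l : List String) :
    floorSafeLoop floor l =
      l.all (fun e => if PySem.Str.pyGet? e 1 = some 'M'
                      then floor.contains (pvAddG e) else true) := by
  induction l with
  | nil => rfl
  | cons e rest ih =>
    simp only [floorSafeLoop, List.all_cons]
    by_cases hm : PySem.Str.pyGet? e 1 = some 'M'
    · rw [if_pos hm, if_pos hm]
      cases hc : floor.contains (pvAddG e) with
      | true => simp [ih]
      | false => simp
    · rw [if_neg hm, if_neg hm, Bool.true_and, ih]

-- Full specification of the inner while loop: it never moves left, stays in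
-- range, stops at the first entry not below s, and everything it skipped is below s.
theorem advanceIdx_spec (avail : List String) (s : String) (i : Nat) :
      i ≤ advanceIdx avail s i ∧ (i ≤ avail.length → advanceIdx avail s i ≤ avail.length) ∧
      (∀ h : advanceIdx avail s i < avail.length, ¬ avail[advanceIdx avail s i] < s) ∧
      (∀ k (hk : k < avail.length), i ≤ k → k < advanceIdx avail s i → avail[k] < s) := by
  fun_induction advanceIdx avail s i with
  | case1 i h hlt ih =>
    obtain ⟨h1, h2, h3, h4⟩ := ih
    refine ⟨by omega, fun _ => h2 (by omega), h3, ?_⟩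
    intro k hk hik hkadv
    rcases Nat.eq_or_lt_of_le hik with rfl | hik'
    · exact hlt
    · exact h4 k hk hik' hkadv
  | case2 i h hlt =>
    exact ⟨le_refl _, fun _ => le_of_lt h, fun _ => hlt, fun k hk hik hkad => absurd hik (by omega)⟩
  | case3 i h =>
    refine ⟨le_refl _, fun hi => hi, fun hlt => absurd hlt h, fun k hk hik hkad => absurd hik (by omega)⟩

-- On a sorted avail and a sorted needed, the two-pointer sweep decides
-- ∀ s ∈ needed, s ∈ avail.
theorem mergeLoop_eq_all (avail : List String) (hs : avail.Pairwise (· ≤ ·)) :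
    ∀ (needed : List String) (i : Nat), i ≤ avail.length →
      needed.Pairwise (· ≤ ·) →
      (∀ k (hk : k < avail.length), k < i → ∀ s ∈ needed, avail[k] < s) →
      mergeLoop avail needed i = needed.all (fun s => avail.contains s) := by
  intro needed
  induction needed with
  | nil => intro i _ _ _; rfl
  | cons s rest ih =>
    intro i hi hpw H
    obtain ⟨h1, h2, h3, h4⟩ := advanceIdx_spec avail s i
    have hjle : advanceIdx avail s i ≤ avail.length := h2 hi
    have hbelow : ∀ k (hk : k < avail.length), k < advanceIdx avail s i → avail[k] < s := by
      intro k hk hkj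
      by_cases hki : k < i
      · exact H k hk hki s List.mem_cons_self
      · exact h4 k hk (by omega) hkj
    simp only [mergeLoop]
    by_cases hcase : advanceIdx avail s i = avail.length ∨ avail[advanceIdx avail s i]? ≠ some s
    · have hnotmem : s ∉ avail := by
        intro hmem
        obtain ⟨k, hk, hke⟩ := List.getElem_of_mem hmem
        by_cases hkj : k < advanceIdx avail s i
        · exact absurd (hke ▸ hbelow k hk hkj) (lt_irrefl s)
        · have hjlt : advanceIdx avail s i < avail.length := by omega
          rcases hcase with hlen | hne
          · omega
          · have hle1 : s ≤ avail[advanceIdx avail s i] := le_of_not_gt (h3 hjlt)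
            have hle2 : avail[advanceIdx avail s i] ≤ avail[k] := by
              rcases Nat.eq_or_lt_of_le (Nat.le_of_not_lt hkj) with heq | hlt'
              · subst heq; exact le_refl _
              · exact (List.pairwise_iff_getElem.mp hs) _ _ hjlt hk hlt'
            have : avail[advanceIdx avail s i] = s := le_antisymm (hke ▸ hle2) hle1
            exact hne (by rw [List.getElem?_eq_getElem hjlt, this])
      rw [if_pos hcase]
      simp [List.all_cons, hnotmem]
    · simp only [not_or, not_not] at hcase
      obtain ⟨hne, hsome⟩ := hcase
      have hjlt : advanceIdx avail s i < avail.length := lt_of_le_of_ne hjle hne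
      have havj : avail[advanceIdx avail s i] = s := by
        have h' := hsome
        rw [List.getElem?_eq_getElem hjlt] at h'
        exact Option.some.inj h'
      rw [if_neg (by simp only [not_or, not_not]; exact ⟨hne, hsome⟩)]
      rw [ih (advanceIdx avail s i) hjle (List.Pairwise.of_cons hpw) ?_]
      · have hmem' : s ∈ avail := havj ▸ List.getElem_mem hjlt
        simp [List.all_cons, hmem']
      · intro k hk hkj s' hs'
        exact lt_of_lt_of_le (hbelow k hk hkj) ((List.pairwise_cons.mp hpw).1 s' hs')

-- With a generator present, B computes exactly "every M-item's '<elem>G' string is on the floor".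
theorem alt_eq_all (floor : List String)
    (hg : floor.any (fun e => PySem.Str.pyGet? e 1 == some 'G') = true) :
    floor_is_safe_alt floor =
      floor.all (fun e => if PySem.Str.pyGet? e 1 = some 'M'
                          then floor.contains (pvAddG e) else true) := by
  rw [floor_is_safe_alt, hg]
  simp only [Bool.not_true, Bool.false_eq_true, if_false]
  have hsA : (PySem.List.sorted floor (fun x => x) false).Pairwise (· ≤ ·) := by
    simpa using PySem.List.sorted_pairwise floor (fun x => x)
  rw [mergeLoop_eq_all _ hsA _ 0 (Nat.zero_le _)
      (by simpa using PySem.List.sorted_pairwise ((floor.filter (fun e => PySem.Str.pyGet? e 1 == some 'M')).map pvAddG) (fun x => x))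
      (fun k hk h0 => absurd h0 (Nat.not_lt_zero k))]
  rw [Bool.eq_iff_iff, List.all_eq_true, List.all_eq_true]
  constructor
  · intro hall e hef
    by_cases hem : PySem.Str.pyGet? e 1 = some 'M'
    · rw [if_pos hem]
      have hin : pvAddG e ∈ PySem.List.sorted
          ((floor.filter (fun e => PySem.Str.pyGet? e 1 == some 'M')).map pvAddG)
          (fun x => x) false := by
        rw [PySem.List.mem_sorted]
        exact List.mem_map.mpr ⟨e, List.mem_filter.mpr ⟨hef, by simpa using hem⟩, rfl⟩
      have := hall _ hin
      simp only [List.contains_iff_mem] at this ⊢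
      rw [PySem.List.mem_sorted] at this
      exact this
    · rw [if_neg hem]
  · intro hall s hsmem
    rw [PySem.List.mem_sorted] at hsmem
    obtain ⟨e, hef, rfl⟩ := List.mem_map.mp hsmem
    rw [List.mem_filter] at hef
    obtain ⟨hef, hem⟩ := hef
    have := hall e hef
    rw [if_pos (by simpa using hem)] at this
    simp only [List.contains_iff_mem] at this ⊢
    rw [PySem.List.mem_sorted]
    exact this

theorem floor_is_safe_spec_aux (floor : List String) :
    floor_is_safe floor = floor_is_safe_alt floor := by
  rw [floor_is_safe, has_gen_any]
  cases hg : floor.any (fun e => PySem.Str.pyGet? e 1 == some 'G') with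
  | false =>
    rw [floor_is_safe_alt, hg]
    rfl
  | true =>
    simp only [Bool.not_true, Bool.false_eq_true, if_false]
    rw [safe_loop_all, alt_eq_all floor hg]

-- ===== VERDICT (by name: the statement is the Claim_ definition above) =====
theorem floor_is_safe_spec : Claim_equal_floor_is_safe := by
  intro floor _ _
  unfold Spec_floor_is_safe
  exact floor_is_safe_spec_aux floor
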